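-- pv_equiv track=rewrite | github.com/ayalalinn/NewsProject | nlp/agents/image_fetcher.py | _candidate_texts
-- ===== SOURCE A (Python) =====
-- from typing import List, Dict, Optional
--
-- def _candidate_texts(entities: List[Dict]) -> List[str]:
--     """
--     מחזיר מועמדים לשאילתא לפי עדיפויות: PERSON > ORG > LOCATION, בלי כפילויות, בלי ריקים.
--     """
--     prio = {"PERSON": 0, "ORG": 1, "LOCATION": 2}
--     cleaned = []
--     for e in entities:
--         t = (e.get("type") or "").upper()
--         txt = (e.get("text") or "").strip()
--         if not txt:
--             continue
--         cleaned.append((prio.get(t, 99), txt))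
--     cleaned.sort(key=lambda x: x[0])
--     seen = set()
--     out: List[str] = []
--     for _, txt in cleaned:
--         key = txt.lower()
--         if key in seen:
--             continue
--         seen.add(key)
--         out.append(txt)
--     return out
-- ===== SOURCE B (Python) =====
-- def _candidate_texts(entities):
--     prio = {"PERSON": 0, "ORG": 1, "LOCATION": 2}
--     best = {}
--     i = 0
--     for e in entities:
--         txt = (e.get("text") or "").strip()
--         if not txt:
--             continue
--         p = prio.get((e.get("type") or "").upper(), 99)
--         key = txt.lower()
--         cur = best.get(key)
--         if cur is None or p < cur[0]:
--             best[key] = (p, i, txt)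
--         i += 1
--     recs = sorted(best.values(), key=lambda r: (r[0], r[1]))
--     return [r[2] for r in recs]
-- ===== Notes on version B (the rewrite author's own statement) =====
-- stated objective: alternative
-- what changed: Instead of sorting every cleaned entry by priority and then scanning with a seen-set, B makes one pass building a dict keyed on txt.lower() that keeps only the best (min priority, earliest index) record per key, then sorts just the unique records by (priority, index) and emits their original-cased texts.
import Mathlib
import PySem

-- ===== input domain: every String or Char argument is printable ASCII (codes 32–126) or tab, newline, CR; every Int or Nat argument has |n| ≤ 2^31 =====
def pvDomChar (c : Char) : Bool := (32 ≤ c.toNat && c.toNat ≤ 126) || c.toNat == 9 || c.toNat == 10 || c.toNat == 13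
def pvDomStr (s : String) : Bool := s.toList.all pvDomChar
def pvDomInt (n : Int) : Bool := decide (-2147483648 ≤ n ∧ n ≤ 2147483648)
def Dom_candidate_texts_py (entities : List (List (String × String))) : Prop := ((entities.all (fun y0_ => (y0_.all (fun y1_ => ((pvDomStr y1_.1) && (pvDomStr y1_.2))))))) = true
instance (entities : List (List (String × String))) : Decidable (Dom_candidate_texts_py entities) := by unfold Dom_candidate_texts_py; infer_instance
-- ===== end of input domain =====

-- B dedups into a dict of best records keyed by lowercased text during one pass, then sorts only the
-- unique records by (priority, index); A sorts every cleaned entry by priority and dedups with a seen-set.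

-- ===== PORT A =====
def candidate_texts_py (entities : List (List (String × String))) : List String :=
  let prio : PySem.Dict String Int :=
    PySem.Dict.ofList [("PERSON", 0), ("ORG", 1), ("LOCATION", 2)]
  let cleaned : List (Int × String) := entities.foldl (fun cleaned e =>
    let t := PySem.Str.upper ((e.lookup "type").getD "")
    let txt := PySem.Str.strip ((e.lookup "text").getD "")
    if txt == "" then cleaned
    else cleaned ++ [(prio.getD t 99, txt)]) []
  let sortedc := PySem.List.sorted cleaned (fun x => x.1) false
  let fin := sortedc.foldl (fun (st : PySem.Set String × List String) x =>
    if PySem.Set.contains st.1 (PySem.Str.lower x.2) then st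
    else (PySem.Set.add st.1 (PySem.Str.lower x.2), st.2 ++ [x.2])) (PySem.Set.empty, [])
  fin.2

-- ===== PORT B =====
def candidate_texts_py_alt (entities : List (List (String × String))) : List String :=
  let prio : PySem.Dict String Int :=
    PySem.Dict.ofList [("PERSON", 0), ("ORG", 1), ("LOCATION", 2)]
  let st := entities.foldl
    (fun (st : PySem.Dict String (Int × Int × String) × Int) e =>
      let txt := PySem.Str.strip ((e.lookup "text").getD "")
      if txt == "" then st
      else
        let p := prio.getD (PySem.Str.upper ((e.lookup "type").getD "")) 99
        let best :=
          match st.1.get? (PySem.Str.lower txt) with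
          | none => st.1.insert (PySem.Str.lower txt) (p, st.2, txt)
          | some cur =>
            if p < cur.1 then st.1.insert (PySem.Str.lower txt) (p, st.2, txt) else st.1
        (best, st.2 + 1))
    (PySem.Dict.empty, 0)
  let recs := PySem.List.sorted2 st.1.values (fun r => r.1) (fun r => r.2.1) false
  recs.map (fun r => r.2.2)

-- ===== PRECONDITION & SPEC =====
def Spec_candidate_texts_py (entities : List (List (String × String))) (out : List String) : Prop := out = candidate_texts_py_alt entities
instance (entities : List (List (String × String))) (out : List String) : Decidable (Spec_candidate_texts_py entities out) := by unfold Spec_candidate_texts_py; infer_instance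

-- ===== CLAIM (what is proved, stated in full; the proofs are below) =====
def Claim_equal_candidate_texts_py : Prop := ∀ (entities : List (List (String × String))), Dom_candidate_texts_py entities → Spec_candidate_texts_py entities (candidate_texts_py entities)

-- ===== LEMMAS AND PROOFS =====

-- Cleaning helpers shared by the proofs (values both programs compute per entity).
def pvTxt (e : List (String × String)) : String := PySem.Str.strip ((e.lookup "text").getD "")
def pvP (e : List (String × String)) : Int :=
  (PySem.Dict.ofList [("PERSON", (0 : Int)), ("ORG", 1), ("LOCATION", 2)]).getD
    (PySem.Str.upper ((e.lookup "type").getD "")) 99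
def pvFe (e : List (String × String)) : Int × String := (pvP e, pvTxt e)
def pvCleaned (entities : List (List (String × String))) : List (Int × String) :=
  (entities.filter (fun e => !(pvTxt e == ""))).map pvFe

-- Entries: (index, (priority, text)); dict records: (priority, index, text).
def keyE (e : Int × (Int × String)) : Int ×ₗ Int := toLex (e.2.1, e.1)
def keyV (v : Int × Int × String) : Int ×ₗ Int := toLex (v.1, v.2.1)
def kent (e : Int × (Int × String)) : String := PySem.Str.lower e.2.2
def toVal (e : Int × (Int × String)) : Int × Int × String := (e.2.1, e.1, e.2.2)
def toEnt (v : Int × Int × String) : Int × (Int × String) := (v.2.1, (v.1, v.2.2))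

def dstep (d : PySem.Dict String (Int × Int × String)) (e : Int × (Int × String)) :
    PySem.Dict String (Int × Int × String) :=
  match d.get? (kent e) with
  | none => d.insert (kent e) (e.2.1, e.1, e.2.2)
  | some cur => if e.2.1 < cur.1 then d.insert (kent e) (e.2.1, e.1, e.2.2) else d

-- First-occurrence-per-key dedup (the canonical form of A's seen-set loop).
def dedupG {α : Type} (k : α → String) : PySem.Set String → List α → List α
  | _, [] => []
  | seen, x :: xs =>
    if PySem.Set.contains seen (k x) then dedupG k seen xs
    else x :: dedupG k (PySem.Set.add seen (k x)) xs

-- A's algorithm on a cleaned list, B's algorithm on a cleaned list.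
def A2 (l : List (Int × String)) : List String :=
  ((PySem.List.sorted l (fun x => x.1) false).foldl
    (fun (st : PySem.Set String × List String) x =>
      if PySem.Set.contains st.1 (PySem.Str.lower x.2) then st
      else (PySem.Set.add st.1 (PySem.Str.lower x.2), st.2 ++ [x.2])) (PySem.Set.empty, [])).2

def B2 (l : List (Int × String)) : List String :=
  (PySem.List.sorted2 ((PySem.List.enumerate l 0).foldl dstep PySem.Dict.empty).values
    (fun r => r.1) (fun r => r.2.1) false).map (fun r => r.2.2)


-- Lex-order on Int pairs, componentwise.
lemma lexlt (p i q j : Int) :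
    ((toLex (p, i) : Int ×ₗ Int) < toLex (q, j)) ↔ (p < q ∨ (p = q ∧ i < j)) := by
  simp [Prod.Lex.lt_iff]

lemma lex_eq_of_not_lt {a b : Int ×ₗ Int} (h1 : ¬ a < b) (h2 : ¬ b < a) : a = b :=
  le_antisymm (not_lt.mp h2) (not_lt.mp h1)

-- sorted2 with Int keys is sorted with the lex pair key.
lemma before_eq {α : Type} (k1 k2 : α → Int) :
    (fun a b => decide (k1 a < k1 b) || (!decide (k1 b < k1 a) && decide (k2 a < k2 b)))
      = fun a b => decide ((toLex (k1 a, k2 a) : Int ×ₗ Int) < toLex (k1 b, k2 b)) := by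
  funext a b
  by_cases h1 : k1 a < k1 b <;> by_cases h2 : k1 b < k1 a <;> by_cases h3 : k2 a < k2 b <;>
    simp [h1, h2, h3, Prod.Lex.lt_iff] <;> omega

lemma sorted2_eq {α : Type} (xs : List α) (k1 k2 : α → Int) :
    PySem.List.sorted2 xs k1 k2 false
      = PySem.List.sorted xs (fun a => (toLex (k1 a, k2 a) : Int ×ₗ Int)) false := by
  unfold PySem.List.sorted2 PySem.List.sorted
  simp only [Bool.false_eq_true, if_false, before_eq]

-- sorted commutes with map when the key factors through the map.
lemma insertBy_map {α β : Type} (h : α → β) (bef : β → β → Bool) (x : α) (acc : List α) :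
    PySem.List.insertBy bef (h x) (acc.map h)
      = (PySem.List.insertBy (fun a b => bef (h a) (h b)) x acc).map h := by
  induction acc with
  | nil => simp [PySem.List.insertBy]
  | cons y ys ih =>
    simp only [List.map_cons, PySem.List.insertBy]
    by_cases hb : bef (h x) (h y) <;> simp [hb, ih]

lemma foldl_insertBy_map {α β κ : Type} [LT κ] [DecidableLT κ] (hm : α → β) (key : β → κ) :
    ∀ (xs acc : List α),
      xs.foldl (fun a x => PySem.List.insertBy (fun a b => decide (key a < key b)) (hm x) a) (acc.map hm)
        = (xs.foldl (fun a x => PySem.List.insertBy (fun a b => decide (key (hm a) < key (hm b))) x a) acc).map hm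
  | [], acc => rfl
  | x :: xs, acc => by
    rw [List.foldl_cons, List.foldl_cons, insertBy_map hm _ x acc,
      foldl_insertBy_map hm key xs]

lemma sorted_map {α β κ : Type} [LT κ] [DecidableLT κ] (hm : α → β) (key : β → κ) (xs : List α) :
    PySem.List.sorted (xs.map hm) key false
      = (PySem.List.sorted xs (fun a => key (hm a)) false).map hm := by
  rw [PySem.List.sorted_eq_foldl_insertBy, PySem.List.sorted_eq_foldl_insertBy, List.foldl_map]
  simpa using foldl_insertBy_map hm key xs []

-- Stability of the insertion sort: indices of equal keys stay in order.
lemma insertBy_stable {α : Type} (key idx : α → Int) (x : α) (acc : List α)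
    (hacc : acc.Pairwise (fun a b => (toLex (key a, idx a) : Int ×ₗ Int) < toLex (key b, idx b)))
    (hx : ∀ y ∈ acc, idx y < idx x) :
    (PySem.List.insertBy (fun a b => decide (key a < key b)) x acc).Pairwise
      (fun a b => (toLex (key a, idx a) : Int ×ₗ Int) < toLex (key b, idx b)) := by
  induction acc with
  | nil => simp [PySem.List.insertBy]
  | cons y ys ih =>
    rw [List.pairwise_cons] at hacc
    obtain ⟨hy, hys⟩ := hacc
    by_cases hb : key x < key y
    · have hrw : PySem.List.insertBy (fun a b => decide (key a < key b)) x (y :: ys)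
          = x :: y :: ys := by simp [PySem.List.insertBy, hb]
      rw [hrw, List.pairwise_cons]
      refine ⟨?_, List.pairwise_cons.mpr ⟨hy, hys⟩⟩
      intro z hz
      rcases List.mem_cons.mp hz with rfl | hz'
      · exact (lexlt _ _ _ _).mpr (Or.inl hb)
      · have hyz := hy z hz'
        rw [lexlt] at hyz ⊢
        omega
    · have hrw : PySem.List.insertBy (fun a b => decide (key a < key b)) x (y :: ys)
          = y :: PySem.List.insertBy (fun a b => decide (key a < key b)) x ys := by
        simp [PySem.List.insertBy, hb]
      rw [hrw, List.pairwise_cons]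
      constructor
      · intro z hz
        rcases (PySem.List.mem_insertBy _ _ _ _).mp hz with rfl | hz'
        · have h1 : idx y < idx z := hx y (List.mem_cons_self)
          rw [lexlt]; omega
        · exact hy z hz'
      · exact ih hys (fun y' hy' => hx y' (List.mem_cons_of_mem _ hy'))

lemma foldl_insertBy_stable {α : Type} (key idx : α → Int) :
    ∀ (xs acc : List α),
      acc.Pairwise (fun a b => (toLex (key a, idx a) : Int ×ₗ Int) < toLex (key b, idx b)) →
      (∀ a ∈ acc, ∀ b ∈ xs, idx a < idx b) →
      xs.Pairwise (fun a b => idx a < idx b) →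
      (xs.foldl (fun acc x => PySem.List.insertBy (fun a b => decide (key a < key b)) x acc) acc).Pairwise
        (fun a b => (toLex (key a, idx a) : Int ×ₗ Int) < toLex (key b, idx b))
  | [], acc, h1, _, _ => h1
  | x :: xs, acc, h1, h2, h3 => by
    rw [List.foldl_cons]
    rw [List.pairwise_cons] at h3
    apply foldl_insertBy_stable key idx xs _
    · exact insertBy_stable key idx x acc h1 (fun y hy => h2 y hy x List.mem_cons_self)
    · intro a ha b hb
      rcases (PySem.List.mem_insertBy _ _ _ _).mp ha with rfl | ha'
      · exact h3.1 b hb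
      · exact h2 a ha' b (List.mem_cons_of_mem _ hb)
    · exact h3.2

lemma sorted_stable {α : Type} (key idx : α → Int) (xs : List α)
    (h : xs.Pairwise (fun a b => idx a < idx b)) :
    (PySem.List.sorted xs key false).Pairwise
      (fun a b => (toLex (key a, idx a) : Int ×ₗ Int) < toLex (key b, idx b)) := by
  rw [PySem.List.sorted_eq_foldl_insertBy]
  exact foldl_insertBy_stable key idx xs [] (by simp) (by simp) h

-- A's seen-set loop computes dedupG.
lemma foldl_dedupG {α β : Type} (k : α → String) (f : α → β) (xs : List α) :
    ∀ (seen : PySem.Set String) (out : List β),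
    (xs.foldl (fun (st : PySem.Set String × List β) x =>
        if PySem.Set.contains st.1 (k x) then st
        else (PySem.Set.add st.1 (k x), st.2 ++ [f x])) (seen, out)).2
      = out ++ (dedupG k seen xs).map f := by
  induction xs with
  | nil => intro seen out; simp [dedupG]
  | cons x xs ih =>
    intro seen out
    simp only [dedupG, List.foldl_cons]
    cases hc : PySem.Set.contains seen (k x)
    · simp only [Bool.false_eq_true, if_false, List.map_cons]
      rw [ih]
      simp
    · simp only [if_true]
      exact ih seen out

lemma dedupG_sublist {α : Type} (k : α → String) (xs : List α) :
    ∀ seen, List.Sublist (dedupG k seen xs) xs := by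
  induction xs with
  | nil => intro seen; simp [dedupG]
  | cons x xs ih =>
    intro seen
    simp only [dedupG]
    cases hc : PySem.Set.contains seen (k x)
    · simp only [Bool.false_eq_true, if_false]
      exact List.Sublist.cons₂ x (ih _)
    · simp only [if_true]
      exact List.Sublist.cons x (ih _)

lemma dedupG_map {α β : Type} (k : β → String) (h : α → β) (xs : List α) :
    ∀ seen, dedupG k seen (xs.map h) = (dedupG (fun a => k (h a)) seen xs).map h := by
  induction xs with
  | nil => intro seen; simp [dedupG]
  | cons x xs ih =>
    intro seen
    simp only [List.map_cons, dedupG]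
    cases hc : PySem.Set.contains seen (k (h x))
    · simp only [Bool.false_eq_true, if_false, List.map_cons]
      rw [ih]
    · simp only [if_true]
      exact ih seen

lemma mem_dedupG {α : Type} (k : α → String) (r : α → Int ×ₗ Int) :
    ∀ (xs : List α), xs.Pairwise (fun a b => r a < r b) →
    ∀ (seen : PySem.Set String) (v : α),
      v ∈ dedupG k seen xs
        ↔ v ∈ xs ∧ k v ∉ seen ∧ ∀ w ∈ xs, k w = k v → ¬ (r w < r v)
  | [], _, seen, v => by simp [dedupG]
  | x :: xs, hxs, seen, v => by
    rw [List.pairwise_cons] at hxs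
    obtain ⟨hx, hxs'⟩ := hxs
    simp only [dedupG]
    cases hc : PySem.Set.contains seen (k x)
    · have hcx : k x ∉ seen := by simp at hc; exact hc
      simp only [Bool.false_eq_true, if_false]
      constructor
      · intro hv
        rcases List.mem_cons.mp hv with rfl | hv'
        · refine ⟨List.mem_cons_self, hcx, ?_⟩
          intro w hw hkw
          rcases List.mem_cons.mp hw with rfl | hw'
          · exact lt_irrefl _
          · exact fun hlt => absurd (hx w hw') (not_lt.mpr (le_of_lt hlt))
        · rw [mem_dedupG k r xs hxs'] at hv'
          obtain ⟨hv1, hns, hmin⟩ := hv'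
          have hkvx : k v ≠ k x := fun h => hns ((PySem.Set.mem_add _ _ _).mpr (Or.inr h))
          refine ⟨List.mem_cons_of_mem _ hv1,
            fun h => hns ((PySem.Set.mem_add _ _ _).mpr (Or.inl h)), ?_⟩
          intro w hw hkw
          rcases List.mem_cons.mp hw with rfl | hw'
          · exact (hkvx hkw.symm).elim
          · exact hmin w hw' hkw
      · rintro ⟨hv, hns, hmin⟩
        rcases List.mem_cons.mp hv with rfl | hv'
        · exact List.mem_cons_self
        · apply List.mem_cons_of_mem
          rw [mem_dedupG k r xs hxs']
          refine ⟨hv', ?_, fun w hw hkw => hmin w (List.mem_cons_of_mem _ hw) hkw⟩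
          intro h
          rcases (PySem.Set.mem_add _ _ _).mp h with h' | h'
          · exact hns h'
          · exact absurd (hx v hv') (hmin x List.mem_cons_self h'.symm)
    · have hcx : k x ∈ seen := by simp at hc; exact hc
      simp only [if_true]
      rw [mem_dedupG k r xs hxs']
      constructor
      · rintro ⟨hv, hns, hmin⟩
        refine ⟨List.mem_cons_of_mem _ hv, hns, ?_⟩
        intro w hw hkw
        rcases List.mem_cons.mp hw with rfl | hw'
        · exact (hns (hkw ▸ hcx)).elim
        · exact hmin w hw' hkw
      · rintro ⟨hv, hns, hmin⟩
        rcases List.mem_cons.mp hv with rfl | hv'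
        · exact absurd hcx hns
        · exact ⟨hv', hns, fun w hw hkw => hmin w (List.mem_cons_of_mem _ hw) hkw⟩

-- Distinct indices identify entries.
lemma idx_inj (l : List (Int × (Int × String))) (hl : l.Pairwise (fun a b => a.1 < b.1)) :
    ∀ a ∈ l, ∀ b ∈ l, a.1 = b.1 → a = b := by
  induction l with
  | nil => simp
  | cons x xs ih =>
    rw [List.pairwise_cons] at hl
    obtain ⟨hx, hxs⟩ := hl
    intro a ha b hb hab
    rcases List.mem_cons.mp ha with rfl | ha' <;> rcases List.mem_cons.mp hb with rfl | hb'
    · rfl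
    · exact absurd (hx b hb') (by omega)
    · exact absurd (hx a ha') (by omega)
    · exact ih hxs a ha' b hb' hab

-- The dict fold keeps unique keys.
lemma dstep_get_none {d : PySem.Dict String (Int × Int × String)} {e : Int × (Int × String)}
    (h : d.get? (kent e) = none) :
    dstep d e = d.insert (kent e) (e.2.1, e.1, e.2.2) := by
  unfold dstep
  rw [h]

lemma dstep_get_some {d : PySem.Dict String (Int × Int × String)} {e : Int × (Int × String)}
    {cur : Int × Int × String} (h : d.get? (kent e) = some cur) :
    dstep d e = if e.2.1 < cur.1 then d.insert (kent e) (e.2.1, e.1, e.2.2) else d := by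
  unfold dstep
  rw [h]

lemma dstep_keys_nodup (d : PySem.Dict String (Int × Int × String)) (e : Int × (Int × String))
    (h : d.keys.Nodup) : (dstep d e).keys.Nodup := by
  rcases hg : d.get? (kent e) with _ | cur
  · rw [dstep_get_none hg]
    exact PySem.Dict.nodup_keys_insert _ _ _ h
  · rw [dstep_get_some hg]
    by_cases hlt : e.2.1 < cur.1
    · rw [if_pos hlt]
      exact PySem.Dict.nodup_keys_insert _ _ _ h
    · rw [if_neg hlt]
      exact h

lemma dfold_keys_nodup (l : List (Int × (Int × String))) :
    ∀ (d : PySem.Dict String (Int × Int × String)), d.keys.Nodup → (l.foldl dstep d).keys.Nodup := by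
  induction l with
  | nil => intro d h; exact h
  | cons x xs ih => intro d h; exact ih _ (dstep_keys_nodup d x h)

-- Characterisation of the dict after the fold: per key, the record with minimal (prio, index).
lemma dfold_spec (l : List (Int × (Int × String))) :
    l.Pairwise (fun a b => a.1 < b.1) → ∀ (k : String),
    ((l.foldl dstep PySem.Dict.empty).get? k = none ∧ ∀ e ∈ l, kent e ≠ k)
    ∨ (∃ v, (l.foldl dstep PySem.Dict.empty).get? k = some v ∧ toEnt v ∈ l ∧ kent (toEnt v) = k
        ∧ ∀ e ∈ l, kent e = k → ¬ (keyE e < keyV v)) := by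
  induction l using List.reverseRecOn with
  | nil => intro _ k; left; simp [PySem.Dict.get?_empty]
  | append_singleton l x ih =>
    intro hl k
    have hparts := List.pairwise_append.mp hl
    have hl' := hparts.1
    have hlx : ∀ e ∈ l, e.1 < x.1 := fun e he => hparts.2.2 e he x (by simp)
    rw [List.foldl_append, List.foldl_cons, List.foldl_nil]
    have hkeyVtoVal : keyV (x.2.1, x.1, x.2.2) = keyE x := rfl
    have htoEnt : toEnt (x.2.1, x.1, x.2.2) = x := rfl
    rcases hg : (l.foldl dstep PySem.Dict.empty).get? (kent x) with _ | cur
    · -- key not yet present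
      rw [dstep_get_none hg]
      have hnokey : ∀ e ∈ l, kent e ≠ kent x := by
        rcases ih hl' (kent x) with ⟨_, h2⟩ | ⟨v, hv, _⟩
        · exact h2
        · rw [hv] at hg; exact absurd hg (by simp)
      by_cases hk : k = kent x
      · right
        refine ⟨(x.2.1, x.1, x.2.2), ?_, ?_, ?_, ?_⟩
        · rw [PySem.Dict.get?_insert, if_pos hk]
        · rw [htoEnt]; simp
        · rw [htoEnt, hk]
        · intro e he hke
          rcases List.mem_append.mp he with he' | he'
          · exact absurd (hke.trans hk) (hnokey e he')
          · have hex : e = x := by simpa using he'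
            subst hex
            rw [hkeyVtoVal]
            exact lt_irrefl _
      · rcases ih hl' k with ⟨h1, h2⟩ | ⟨v, hv, hvm, hvk, hvmin⟩
        · left
          refine ⟨?_, ?_⟩
          · rw [PySem.Dict.get?_insert, if_neg hk]; exact h1
          · intro e he
            rcases List.mem_append.mp he with he' | he'
            · exact h2 e he'
            · have hex : e = x := by simpa using he'
              subst hex
              exact fun h => hk h.symm
        · right
          refine ⟨v, ?_, List.mem_append.mpr (Or.inl hvm), hvk, ?_⟩
          · rw [PySem.Dict.get?_insert, if_neg hk]; exact hv
          · intro e he hke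
            rcases List.mem_append.mp he with he' | he'
            · exact hvmin e he' hke
            · have hex : e = x := by simpa using he'
              subst hex
              exact absurd hke (fun h => hk h.symm)
    · -- key present already
      rw [dstep_get_some hg]
      rcases ih hl' (kent x) with ⟨h1, _⟩ | ⟨v0, hv0, hv0m, hv0k, hv0min⟩
      · rw [h1] at hg; exact absurd hg (by simp)
      have hv0cur : v0 = cur := by rw [hv0] at hg; exact Option.some.inj hg
      rw [hv0cur] at hv0m hv0k hv0min
      by_cases hlt : x.2.1 < cur.1
      · rw [if_pos hlt]
        by_cases hk : k = kent x
        · right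
          refine ⟨(x.2.1, x.1, x.2.2), ?_, ?_, ?_, ?_⟩
          · rw [PySem.Dict.get?_insert, if_pos hk]
          · rw [htoEnt]; simp
          · rw [htoEnt, hk]
          · intro e he hke
            rcases List.mem_append.mp he with he' | he'
            · have hmin := hv0min e he' (hke.trans hk)
              simp only [keyE, keyV] at hmin ⊢
              rw [lexlt] at hmin ⊢
              omega
            · have hex : e = x := by simpa using he'
              subst hex
              rw [hkeyVtoVal]
              exact lt_irrefl _
        · rcases ih hl' k with ⟨h1, h2⟩ | ⟨v, hv, hvm, hvk, hvmin⟩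
          · left
            refine ⟨?_, ?_⟩
            · rw [PySem.Dict.get?_insert, if_neg hk]; exact h1
            · intro e he
              rcases List.mem_append.mp he with he' | he'
              · exact h2 e he'
              · have hex : e = x := by simpa using he'
                subst hex
                exact fun h => hk h.symm
          · right
            refine ⟨v, ?_, List.mem_append.mpr (Or.inl hvm), hvk, ?_⟩
            · rw [PySem.Dict.get?_insert, if_neg hk]; exact hv
            · intro e he hke
              rcases List.mem_append.mp he with he' | he'
              · exact hvmin e he' hke
              · have hex : e = x := by simpa using he'
                subst hex
                exact absurd hke (fun h => hk h.symm)
      · rw [if_neg hlt]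
        by_cases hk : k = kent x
        · right
          subst hk
          refine ⟨cur, hg, List.mem_append.mpr (Or.inl hv0m), hv0k, ?_⟩
          intro e he hke
          rcases List.mem_append.mp he with he' | he'
          · exact hv0min e he' hke
          · have hex : e = x := by simpa using he'
            subst hex
            have hidx : cur.2.1 < e.1 := hlx (toEnt cur) hv0m
            simp only [keyE, keyV]
            rw [lexlt]
            omega
        · rcases ih hl' k with ⟨h1, h2⟩ | ⟨v, hv, hvm, hvk, hvmin⟩
          · left
            refine ⟨h1, ?_⟩
            intro e he
            rcases List.mem_append.mp he with he' | he'
            · exact h2 e he'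
            · have hex : e = x := by simpa using he'
              subst hex
              exact fun h => hk h.symm
          · right
            refine ⟨v, hv, List.mem_append.mpr (Or.inl hvm), hvk, ?_⟩
            intro e he hke
            rcases List.mem_append.mp he with he' | he'
            · exact hvmin e he' hke
            · have hex : e = x := by simpa using he'
              subst hex
              exact absurd hke (fun h => hk h.symm)

lemma mem_values_iff (d : PySem.Dict String (Int × Int × String)) (hnd : d.keys.Nodup)
    (v : Int × Int × String) : v ∈ d.values ↔ ∃ k, d.get? k = some v := by
  constructor
  · intro hv
    have hv' : v ∈ d.items.map (fun p => p.2) := by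
      simpa [PySem.Dict.values] using hv
    obtain ⟨⟨k, v'⟩, hp, he⟩ := List.mem_map.mp hv'
    cases he
    exact ⟨k, (PySem.Dict.get?_eq_some_iff_mem_items _ _ _ hnd).mpr hp⟩
  · rintro ⟨k, hk⟩
    have h1 := (PySem.Dict.get?_eq_some_iff_mem_items _ _ _ hnd).mp hk
    have h2 : v ∈ d.items.map (fun p => p.2) := List.mem_map.mpr ⟨(k, v), h1, rfl⟩
    simpa [PySem.Dict.values] using h2

lemma dfold_values_nodup (l : List (Int × (Int × String)))
    (hl : l.Pairwise (fun a b => a.1 < b.1)) :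
    ((l.foldl dstep PySem.Dict.empty).values).Nodup := by
  have hnd : (l.foldl dstep PySem.Dict.empty).keys.Nodup :=
    dfold_keys_nodup l PySem.Dict.empty PySem.Dict.nodup_keys_empty
  have hitems : (l.foldl dstep PySem.Dict.empty).items.Nodup := by
    have hmapped : ((l.foldl dstep PySem.Dict.empty).items.map (fun p => p.1)).Nodup := by
      simpa [PySem.Dict.keys] using hnd
    exact hmapped.of_map
  have hkey : ∀ k v, (l.foldl dstep PySem.Dict.empty).get? k = some v → kent (toEnt v) = k := by
    intro k v hkv
    rcases dfold_spec l hl k with ⟨h1, _⟩ | ⟨v', hv', _, hvk', _⟩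
    · rw [h1] at hkv; exact absurd hkv (by simp)
    · rw [hv'] at hkv; rw [← Option.some.inj hkv]; exact hvk'
  show ((l.foldl dstep PySem.Dict.empty).items.map (fun p => p.2)).Nodup
  apply List.Nodup.map_on ?_ hitems
  rintro ⟨k1, v1⟩ hp1 ⟨k2, v2⟩ hp2 hv
  dsimp only at hv
  subst hv
  have h1 := hkey k1 v1 ((PySem.Dict.get?_eq_some_iff_mem_items _ _ _ hnd).mpr hp1)
  have h2 := hkey k2 v1 ((PySem.Dict.get?_eq_some_iff_mem_items _ _ _ hnd).mpr hp2)
  rw [← h1, ← h2]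

lemma toVal_inj : Function.Injective toVal := by
  rintro ⟨i, p, t⟩ ⟨j, q, u⟩ h
  simp [toVal, Prod.ext_iff] at h
  simp [Prod.ext_iff]
  tauto

-- The heart of the equivalence, over an arbitrary indexed entry list.
lemma core_en (en : List (Int × (Int × String))) (hpw : en.Pairwise (fun a b => a.1 < b.1)) :
    ((PySem.List.sorted (en.map (fun e => e.2)) (fun x => x.1) false).foldl
      (fun (st : PySem.Set String × List String) x =>
        if PySem.Set.contains st.1 (PySem.Str.lower x.2) then st
        else (PySem.Set.add st.1 (PySem.Str.lower x.2), st.2 ++ [x.2])) (PySem.Set.empty, [])).2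
    = (PySem.List.sorted2 (en.foldl dstep PySem.Dict.empty).values
        (fun r => r.1) (fun r => r.2.1) false).map (fun r => r.2.2) := by
  have hstab : (PySem.List.sorted en (fun e => e.2.1) false).Pairwise
      (fun a b => keyE a < keyE b) :=
    sorted_stable (fun e : Int × (Int × String) => e.2.1) (fun e => e.1) en hpw
  have hseq : PySem.List.sorted en keyE false
      = PySem.List.sorted en (fun e => e.2.1) false :=
    PySem.List.sorted_eq_of_perm_of_pairwise_lt en _ keyE
      (PySem.List.sorted_perm en (fun e => e.2.1) false) hstab
  have hs2 : (PySem.List.sorted en keyE false).Pairwise (fun a b => keyE a < keyE b) := by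
    rw [hseq]; exact hstab
  have hmem_s2 : ∀ e, (e ∈ PySem.List.sorted en keyE false) ↔ e ∈ en :=
    fun e => PySem.List.mem_sorted en keyE false e
  have hfd : ((PySem.List.sorted (en.map (fun e => e.2)) (fun x => x.1) false).foldl
      (fun (st : PySem.Set String × List String) x =>
        if PySem.Set.contains st.1 (PySem.Str.lower x.2) then st
        else (PySem.Set.add st.1 (PySem.Str.lower x.2), st.2 ++ [x.2])) (PySem.Set.empty, [])).2
      = [] ++ (dedupG (fun x : Int × String => PySem.Str.lower x.2) PySem.Set.empty
          (PySem.List.sorted (en.map (fun e => e.2)) (fun x => x.1) false)).map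
            (fun x : Int × String => x.2) :=
    foldl_dedupG _ _ _ _ _
  have hmS : PySem.List.sorted (en.map (fun e => e.2)) (fun x => x.1) false
      = (PySem.List.sorted en (fun e => e.2.1) false).map (fun e => e.2) :=
    sorted_map _ _ _
  have hdm : dedupG (fun x : Int × String => PySem.Str.lower x.2) PySem.Set.empty
        ((PySem.List.sorted en keyE false).map (fun e => e.2))
      = (dedupG kent PySem.Set.empty (PySem.List.sorted en keyE false)).map (fun e => e.2) :=
    dedupG_map _ _ _ _
  have hndk : ((en.foldl dstep PySem.Dict.empty).keys).Nodup :=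
    dfold_keys_nodup en PySem.Dict.empty PySem.Dict.nodup_keys_empty
  have hvn := dfold_values_nodup en hpw
  have hRpw : (dedupG kent PySem.Set.empty (PySem.List.sorted en keyE false)).Pairwise
      (fun a b => keyE a < keyE b) :=
    List.Pairwise.sublist (dedupG_sublist kent _ PySem.Set.empty) hs2
  have hRnodup : (dedupG kent PySem.Set.empty (PySem.List.sorted en keyE false)).Nodup :=
    List.Pairwise.imp (fun h heq => absurd (heq ▸ h) (lt_irrefl _)) hRpw
  have hysnodup : ((dedupG kent PySem.Set.empty (PySem.List.sorted en keyE false)).map toVal).Nodup :=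
    List.Nodup.map toVal_inj hRnodup
  have hmemiff : ∀ v, v ∈ (dedupG kent PySem.Set.empty (PySem.List.sorted en keyE false)).map toVal
      ↔ v ∈ (en.foldl dstep PySem.Dict.empty).values := by
    intro v
    constructor
    · intro hv
      obtain ⟨e, he, rfl⟩ := List.mem_map.mp hv
      rw [mem_dedupG kent keyE _ hs2] at he
      obtain ⟨hes2, _, hmin⟩ := he
      have heen : e ∈ en := (hmem_s2 e).mp hes2
      rcases dfold_spec en hpw (kent e) with ⟨_, h2⟩ | ⟨v', hv', hvm', hvk', hvmin'⟩
      · exact absurd rfl (h2 e heen)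
      · have h1 : ¬ (keyE (toEnt v') < keyE e) := hmin (toEnt v') ((hmem_s2 _).mpr hvm') hvk'
        have h2' : ¬ (keyE e < keyE (toEnt v')) := hvmin' e heen rfl
        have heq : keyE e = keyE (toEnt v') := lex_eq_of_not_lt h2' h1
        have hieq : e.1 = (toEnt v').1 :=
          congrArg (fun x : Int ×ₗ Int => (ofLex x).2) heq
        have hee : e = toEnt v' := idx_inj en hpw e heen (toEnt v') hvm' hieq
        have hval : toVal e = v' := by subst hee; rfl
        rw [hval]
        exact (mem_values_iff _ hndk v').mpr ⟨kent e, hv'⟩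
    · intro hv
      obtain ⟨k, hk⟩ := (mem_values_iff _ hndk v).mp hv
      rcases dfold_spec en hpw k with ⟨h1, _⟩ | ⟨v', hv', hvm', hvk', hvmin'⟩
      · rw [h1] at hk; exact absurd hk (by simp)
      · have hvv : v' = v := by rw [hv'] at hk; exact Option.some.inj hk
        subst hvv
        apply List.mem_map.mpr
        refine ⟨toEnt v', ?_, rfl⟩
        rw [mem_dedupG kent keyE _ hs2]
        refine ⟨(hmem_s2 _).mpr hvm', by simp [PySem.Set.empty], ?_⟩
        intro w hw hkw
        exact hvmin' w ((hmem_s2 w).mp hw) (hkw.trans hvk')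
  have hperm : ((dedupG kent PySem.Set.empty (PySem.List.sorted en keyE false)).map toVal).Perm
      (en.foldl dstep PySem.Dict.empty).values :=
    (List.perm_ext_iff_of_nodup hysnodup hvn).mpr hmemiff
  have hyspw : ((dedupG kent PySem.Set.empty (PySem.List.sorted en keyE false)).map toVal).Pairwise
      (fun a b => keyV a < keyV b) :=
    List.Pairwise.map toVal (fun a b h => h) hRpw
  have h2e : PySem.List.sorted2 (en.foldl dstep PySem.Dict.empty).values
      (fun r => r.1) (fun r => r.2.1) false
      = PySem.List.sorted (en.foldl dstep PySem.Dict.empty).values keyV false :=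
    sorted2_eq _ _ _
  have hsortB : PySem.List.sorted (en.foldl dstep PySem.Dict.empty).values keyV false
      = (dedupG kent PySem.Set.empty (PySem.List.sorted en keyE false)).map toVal :=
    PySem.List.sorted_eq_of_perm_of_pairwise_lt _ _ keyV hperm hyspw
  rw [hfd, List.nil_append, hmS, ← hseq, hdm, h2e, hsortB, List.map_map, List.map_map]
  rfl

lemma core (l : List (Int × String)) : A2 l = B2 l := by
  have h := core_en (PySem.List.enumerate l 0) (PySem.List.pairwise_lt_enumerate l 0)
  have hl : (PySem.List.enumerate l 0).map (fun e => e.2) = l :=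
    PySem.List.map_snd_enumerate l 0
  unfold A2 B2
  conv_lhs => rw [← hl]
  exact h

-- Front ends: both ports compute their core algorithm on the cleaned list.
def aloop (acc : List (Int × String)) (e : List (String × String)) : List (Int × String) :=
  if pvTxt e == "" then acc else acc ++ [pvFe e]

def bloop (st : PySem.Dict String (Int × Int × String) × Int) (e : List (String × String)) :
    PySem.Dict String (Int × Int × String) × Int :=
  if pvTxt e == "" then st else (dstep st.1 (st.2, pvFe e), st.2 + 1)

lemma pvCleaned_cons_pos (e : List (String × String)) (es : List (List (String × String)))
    (h : (pvTxt e == "") = true) : pvCleaned (e :: es) = pvCleaned es := by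
  simp [pvCleaned, h]

lemma pvCleaned_cons_neg (e : List (String × String)) (es : List (List (String × String)))
    (h : (pvTxt e == "") = false) : pvCleaned (e :: es) = pvFe e :: pvCleaned es := by
  simp [pvCleaned, h]

lemma afold (es : List (List (String × String))) :
    ∀ acc, es.foldl aloop acc = acc ++ pvCleaned es := by
  induction es with
  | nil => intro acc; simp [pvCleaned]
  | cons e es ih =>
    intro acc
    rw [List.foldl_cons]
    cases h : (pvTxt e == "")
    · rw [show aloop acc e = acc ++ [pvFe e] from by simp [aloop, h],
        ih, pvCleaned_cons_neg e es h]
      simp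
    · rw [show aloop acc e = acc from by simp [aloop, h], ih, pvCleaned_cons_pos e es h]

lemma bfold (es : List (List (String × String))) :
    ∀ (d : PySem.Dict String (Int × Int × String)) (i : Int),
      es.foldl bloop (d, i)
        = ((PySem.List.enumerate (pvCleaned es) i).foldl dstep d,
            i + ((pvCleaned es).length : Int)) := by
  induction es with
  | nil => intro d i; simp [pvCleaned]
  | cons e es ih =>
    intro d i
    rw [List.foldl_cons]
    cases h : (pvTxt e == "")
    · rw [show bloop (d, i) e = (dstep d (i, pvFe e), i + 1) from by simp [bloop, h],
        ih, pvCleaned_cons_neg e es h, PySem.List.enumerate_cons, List.foldl_cons]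
      simp only [Prod.mk.injEq, List.length_cons]
      refine ⟨trivial, ?_⟩
      push_cast
      ring
    · rw [show bloop (d, i) e = (d, i) from by simp [bloop, h], ih, pvCleaned_cons_pos e es h]

lemma frontA (entities : List (List (String × String))) :
    candidate_texts_py entities = A2 (pvCleaned entities) := by
  have h0 : candidate_texts_py entities = A2 (entities.foldl aloop []) := rfl
  rw [h0, afold entities [], List.nil_append]

lemma frontB (entities : List (List (String × String))) :
    candidate_texts_py_alt entities
      = (PySem.List.sorted2 (entities.foldl bloop (PySem.Dict.empty, 0)).1.values
          (fun r => r.1) (fun r => r.2.1) false).map (fun r => r.2.2) := rfl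

lemma frontB' (entities : List (List (String × String))) :
    candidate_texts_py_alt entities = B2 (pvCleaned entities) := by
  rw [frontB, bfold entities PySem.Dict.empty 0]
  rfl

-- ===== VERDICT (by name: the statement is the Claim_ definition above) =====
theorem candidate_texts_py_spec : Claim_equal_candidate_texts_py := by
  intro entities _
  unfold Spec_candidate_texts_py
  rw [frontA, frontB', core]
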